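-- pv_equiv track=rewrite | github.com/papanokechi/wallis-pcf-lean4 | relay_round10b_extensions.py | compute_overpartitions
-- ===== SOURCE A (Python) =====
-- def compute_overpartitions(N):
--     c = [0]*(N+1)
--     for j in range(1, N+1):
--         s, d = 0, 1
--         while d*d <= j:
--             if j%d == 0:
--                 q = j//d
--                 if q%2 == 1: s += d
--                 if d != q and d%2 == 1: s += q
--             d += 1
--         c[j] = 2*s
--     pbar = [0]*(N+1); pbar[0] = 1
--     for n in range(1, N+1):
--         s = 0
--         for j in range(1, n+1): s += c[j]*pbar[n-j]
--         pbar[n] = s//n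
--     return pbar
-- ===== SOURCE B (Python) =====
-- def compute_overpartitions(N):
--     # Sieve: for each odd divisor d, add the cofactor m//d to every multiple m,
--     # so s[j] = sum of e with j = e*q, q odd  (the same c[j]/2 A finds by trial division).
--     s = [0] * (N + 1)
--     for d in range(1, N + 1, 2):
--         for m in range(d, N + 1, d):
--             s[m] += m // d
--     pbar = [0] * (N + 1)
--     pbar[0] = 1
--     for n in range(1, N + 1):
--         acc = 0
--         for j in range(1, n + 1):
--             acc += 2 * s[j] * pbar[n - j]
--         pbar[n] = acc // n
--     return pbar
-- ===== Notes on version B (the rewrite author's own statement) =====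
-- stated objective: alternative
-- what changed: The divisor-sum phase is inverted into a sieve: instead of per-j trial division up to sqrt(j) with divisor-pair logic, B iterates over each odd divisor d and adds the cofactor m//d to every multiple m, then feeds the same convolution recurrence; the divisor phase drops from O(N^1.5) to O(N log N), though the shared O(N^2) convolution dominates overall.
import Mathlib
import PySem

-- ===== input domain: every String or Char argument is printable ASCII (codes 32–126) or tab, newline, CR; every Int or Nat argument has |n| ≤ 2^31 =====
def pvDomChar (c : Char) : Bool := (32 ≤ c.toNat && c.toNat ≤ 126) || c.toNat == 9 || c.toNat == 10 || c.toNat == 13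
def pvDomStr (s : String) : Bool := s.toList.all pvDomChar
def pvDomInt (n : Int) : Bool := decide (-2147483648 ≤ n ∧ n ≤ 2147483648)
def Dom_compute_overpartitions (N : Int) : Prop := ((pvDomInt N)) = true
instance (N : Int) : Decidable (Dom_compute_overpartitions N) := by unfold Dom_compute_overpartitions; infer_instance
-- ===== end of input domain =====

-- B replaces A's per-j sqrt trial division by an odd-divisor sieve (loop inversion); the
-- convolution recurrence is shared, so overall cost is unchanged (objective: alternative).

-- ===== PORT A =====
-- A's inner 'while d*d <= j' loop; the extra '1 ≤ d' conjunct is only a totality guard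
-- (Python starts at d = 1 and increments, so it is always true when the loop runs).
def aWhile (j d s : Int) : Int :=
  if h : 1 ≤ d ∧ d * d ≤ j then
    let s' :=
      if PySem.Int.mod j d = 0 then
        let q := PySem.Int.floordiv j d
        let s1 := if PySem.Int.mod q 2 = 1 then s + d else s
        if d ≠ q ∧ PySem.Int.mod d 2 = 1 then s1 + q else s1
      else s
    aWhile j (d + 1) s'
  else s
termination_by (j + 1 - d).toNat
decreasing_by
  have hd : d * 1 ≤ d * d := by
    have := mul_le_mul_of_nonneg_left h.1 (by omega : (0:Int) ≤ d)
    simpa using this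
  simp only [mul_one] at hd
  omega

-- A's first loop: c[j] = 2*s for j in range(1, N+1)
def aDivisorArray (N : Int) : List Int :=
  (PySem.List.pyRange 1 (N + 1) 1).foldl
    (fun c j => PySem.List.pySetD c j (2 * aWhile j 1 0))
    (List.replicate (N + 1).toNat 0)

def compute_overpartitions (N : Int) : List Int :=
  let c := aDivisorArray N
  let pbar0 := PySem.List.pySetD (List.replicate (N + 1).toNat 0) 0 1
  (PySem.List.pyRange 1 (N + 1) 1).foldl
    (fun pbar n =>
      PySem.List.pySetD pbar n
        (PySem.Int.floordiv
          ((PySem.List.pyRange 1 (n + 1) 1).foldl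
            (fun s j => s + PySem.List.pyGetD c j 0 * PySem.List.pyGetD pbar (n - j) 0) 0)
          n))
    pbar0

-- ===== PORT B =====
-- B's sieve: for each odd d, for each multiple m of d, s[m] += m//d
def bSieve (N : Int) : List Int :=
  (PySem.List.pyRange 1 (N + 1) 2).foldl
    (fun s d =>
      (PySem.List.pyRange d (N + 1) d).foldl
        (fun s m => PySem.List.pySetD s m (PySem.List.pyGetD s m 0 + PySem.Int.floordiv m d)) s)
    (List.replicate (N + 1).toNat 0)

def compute_overpartitions_alt (N : Int) : List Int :=
  let s := bSieve N
  let pbar0 := PySem.List.pySetD (List.replicate (N + 1).toNat 0) 0 1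
  (PySem.List.pyRange 1 (N + 1) 1).foldl
    (fun pbar n =>
      PySem.List.pySetD pbar n
        (PySem.Int.floordiv
          ((PySem.List.pyRange 1 (n + 1) 1).foldl
            (fun acc j => acc + 2 * PySem.List.pyGetD s j 0 * PySem.List.pyGetD pbar (n - j) 0) 0)
          n))
    pbar0

-- ===== PRECONDITION & SPEC =====
-- Pre_ excludes exactly the negative inputs N, on which Python A raises IndexError
-- when initialising the first entry of pbar (B raises there too).
def Pre_compute_overpartitions (N : Int) : Prop := 0 ≤ N
instance (N : Int) : Decidable (Pre_compute_overpartitions N) := by unfold Pre_compute_overpartitions; infer_instance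
def pvWitness_compute_overpartitions : Int := (5)

def Spec_compute_overpartitions (N : Int) (out : List Int) : Prop := out = compute_overpartitions_alt N
instance (N : Int) (out : List Int) : Decidable (Spec_compute_overpartitions N out) := by unfold Spec_compute_overpartitions; infer_instance

-- ===== CLAIM (what is proved, stated in full; the proofs are below) =====
def Claim_equal_compute_overpartitions : Prop := ∀ (N : Int), Dom_compute_overpartitions N → Pre_compute_overpartitions N → Spec_compute_overpartitions N (compute_overpartitions N)

-- ===== LEMMAS AND PROOFS =====

-- the common value: sum over odd divisors d of j of j // d
noncomputable def oddDivCofactorSum (j : Int) : Int :=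
  ∑ d ∈ (Finset.Icc 1 j).filter (fun d => d % 2 = 1 ∧ j % d = 0), j / d

lemma pv_getD_setD (xs : List Int) (i m : Int) (v : Int) (hi : 0 ≤ i)
    (hil : i.toNat < xs.length) (hm : 0 ≤ m) :
    PySem.List.pyGetD (PySem.List.pySetD xs i v) m 0
      = if m = i then v else PySem.List.pyGetD xs m 0 := by
  rw [← Int.toNat_of_nonneg hi, ← Int.toNat_of_nonneg hm,
      PySem.List.pyGetD_pySetD_natCast _ _ _ _ _ hil]
  split_ifs with h1 h2 h2 <;> first | rfl | omega

lemma pv_scatter_set (f : Int → Int) :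
    ∀ (L : List Int) (xs : List Int), L.Nodup →
      (∀ i ∈ L, 0 ≤ i ∧ i.toNat < xs.length) → ∀ m : Int, 0 ≤ m →
      PySem.List.pyGetD (L.foldl (fun s i => PySem.List.pySetD s i (f i)) xs) m 0
        = if m ∈ L then f m else PySem.List.pyGetD xs m 0 := by
  intro L
  induction L with
  | nil => intro xs _ _ m _; simp
  | cons a t ih =>
      intro xs hnd hb m hm
      simp only [List.foldl_cons]
      have ha := hb a (by simp)
      have hlen : ∀ i ∈ t, 0 ≤ i ∧ i.toNat < (PySem.List.pySetD xs a (f a)).length := by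
        intro i hi; rw [PySem.List.length_pySetD]; exact hb i (by simp [hi])
      rw [ih _ (List.nodup_cons.1 hnd).2 hlen m hm]
      by_cases hmt : m ∈ t
      · simp [hmt]
      · rw [if_neg hmt, pv_getD_setD xs a m (f a) ha.1 ha.2 hm]
        by_cases hma : m = a
        · simp [hma]
        · simp [hma, hmt]

lemma pv_scatter_add (f : Int → Int) :
    ∀ (L : List Int) (xs : List Int), L.Nodup →
      (∀ i ∈ L, 0 ≤ i ∧ i.toNat < xs.length) → ∀ m : Int, 0 ≤ m →
      PySem.List.pyGetD
          (L.foldl (fun s i => PySem.List.pySetD s i (PySem.List.pyGetD s i 0 + f i)) xs) m 0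
        = PySem.List.pyGetD xs m 0 + if m ∈ L then f m else 0 := by
  intro L
  induction L with
  | nil => intro xs _ _ m _; simp
  | cons a t ih =>
      intro xs hnd hb m hm
      simp only [List.foldl_cons]
      have ha := hb a (by simp)
      have hlen : ∀ i ∈ t, 0 ≤ i ∧ i.toNat <
          (PySem.List.pySetD xs a (PySem.List.pyGetD xs a 0 + f a)).length := by
        intro i hi; rw [PySem.List.length_pySetD]; exact hb i (by simp [hi])
      rw [ih _ (List.nodup_cons.1 hnd).2 hlen m hm,
          pv_getD_setD xs a m _ ha.1 ha.2 hm]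
      by_cases hma : m = a
      · subst hma
        have hmt : m ∉ t := (List.nodup_cons.1 hnd).1
        simp [hmt]
      · by_cases hmt : m ∈ t <;> simp [hma, hmt]

lemma pv_nodup_pyRange_pos (a b s : Int) (hs : 0 < s) :
    (PySem.List.pyRange a b s).Nodup := by
  rw [PySem.List.pyRange_of_pos a b hs]
  refine List.Nodup.map ?_ (List.nodup_range)
  intro x y hxy
  have : s * (x:Int) = s * y := by linarith
  have := mul_left_cancel₀ (by omega : s ≠ 0) this
  exact_mod_cast this

def Gfun (j k : Int) : Int :=
  (if (j / k) % 2 = 1 then k else 0) +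
  (if k ≠ j / k ∧ k % 2 = 1 then j / k else 0)

lemma pv_mod2 (a : Int) : PySem.Int.mod a 2 = a % 2 :=
  PySem.Int.mod_eq_emod_of_pos (by norm_num)

lemma aWhile_sum (j : Int) : ∀ (d s : Int), 1 ≤ d →
    aWhile j d s = s + ∑ k ∈ (Finset.Icc d j).filter (fun k => j % k = 0 ∧ k * k ≤ j), Gfun j k := by
  intro d s
  induction d, s using aWhile.induct j with
  | case1 d s h s' ih =>
      intro _
      have hd1 : 1 ≤ d := h.1
      have hdd : d * d ≤ j := h.2
      have hdj : d ≤ j := by nlinarith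
      have hmod : PySem.Int.mod j d = j % d := PySem.Int.mod_eq_emod_of_pos (by omega)
      have hdiv : PySem.Int.floordiv j d = j / d := PySem.Int.floordiv_eq_ediv_of_pos (by omega)
      rw [aWhile, dif_pos h]
      have ih' := ih (by omega)
      simp only [s'] at ih'
      simp only [dite_eq_ite] at ih'
      rw [ih']
      by_cases hdvd : j % d = 0
      · have hset : (Finset.Icc d j).filter (fun k => j % k = 0 ∧ k * k ≤ j)
            = insert d ((Finset.Icc (d + 1) j).filter (fun k => j % k = 0 ∧ k * k ≤ j)) := by
          ext x
          simp only [Finset.mem_filter, Finset.mem_insert, Finset.mem_Icc]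
          constructor
          · rintro ⟨⟨hx1, hx2⟩, hP⟩
            by_cases hxd : x = d
            · exact Or.inl hxd
            · exact Or.inr ⟨⟨by omega, hx2⟩, hP⟩
          · rintro (rfl | ⟨⟨hx1, hx2⟩, hP⟩)
            · exact ⟨⟨le_refl _, hdj⟩, hdvd, hdd⟩
            · exact ⟨⟨by omega, hx2⟩, hP⟩
        rw [hset, Finset.sum_insert (by simp only [Finset.mem_filter, Finset.mem_Icc]; omega)]
        simp only [hmod, hdiv, pv_mod2, if_pos hdvd]
        unfold Gfun
        split_ifs <;> ring
      · have hset : (Finset.Icc d j).filter (fun k => j % k = 0 ∧ k * k ≤ j)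
            = (Finset.Icc (d + 1) j).filter (fun k => j % k = 0 ∧ k * k ≤ j) := by
          ext x
          simp only [Finset.mem_filter, Finset.mem_Icc]
          constructor
          · rintro ⟨⟨hx1, hx2⟩, hP⟩
            refine ⟨⟨?_, hx2⟩, hP⟩
            rcases eq_or_lt_of_le hx1 with rfl | hlt
            · exact absurd hP.1 hdvd
            · omega
          · rintro ⟨⟨hx1, hx2⟩, hP⟩
            exact ⟨⟨by omega, hx2⟩, hP⟩
        rw [hset]
        simp only [hmod, if_neg hdvd]
  | case2 d s h =>
      intro hd
      have hddj : ¬ (d * d ≤ j) := fun hc => h ⟨hd, hc⟩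
      have hempty : (Finset.Icc d j).filter (fun k => j % k = 0 ∧ k * k ≤ j) = ∅ := by
        rw [Finset.filter_eq_empty_iff]
        rintro x hx ⟨-, hxx⟩
        rw [Finset.mem_Icc] at hx
        have : d * d ≤ x * x := mul_le_mul hx.1 hx.1 (by omega) (by omega)
        omega
      rw [aWhile, dif_neg h, hempty, Finset.sum_empty, add_zero]

lemma divfacts (j k : Int) (hj : 1 ≤ j) (hk1 : 1 ≤ k) (hkd : k ∣ j) :
    1 ≤ j / k ∧ j / k ≤ j ∧ (j / k) ∣ j ∧ j / (j / k) = k ∧ (j / k) * k = j := by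
  have hmul : j / k * k = j := Int.ediv_mul_cancel hkd
  have hkj : k ≤ j := Int.le_of_dvd (by omega) hkd
  have h1 : 1 ≤ j / k := by
    rw [Int.le_ediv_iff_mul_le (by omega : (0:Int) < k)]
    omega
  have h2 : j / k ≤ j := Int.ediv_le_self _ (by omega)
  have h3 : (j / k) ∣ j := ⟨k, hmul.symm⟩
  have h4 : k * (j / k) / (j / k) = k := Int.mul_ediv_cancel k (by omega : j / k ≠ 0)
  rw [Int.mul_ediv_cancel' hkd] at h4
  exact ⟨h1, h2, h3, h4, hmul⟩

lemma pairing (j : Int) (hj : 1 ≤ j) :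
    ∑ k ∈ (Finset.Icc 1 j).filter (fun k => j % k = 0 ∧ k * k ≤ j), Gfun j k
      = ∑ d ∈ (Finset.Icc 1 j).filter (fun d => d % 2 = 1 ∧ j % d = 0), j / d := by
  unfold Gfun
  rw [Finset.sum_add_distrib]
  rw [← Finset.sum_filter_add_sum_filter_not
        ((Finset.Icc 1 j).filter (fun d => d % 2 = 1 ∧ j % d = 0)) (fun d => j ≤ d * d)]
  congr 1
  · -- Σ_{small k | j, cofactor odd} k = Σ_{odd divisors d with j ≤ d*d} j / d
    rw [← Finset.sum_filter]
    rw [Finset.filter_filter]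
    refine Finset.sum_nbij' (fun k => j / k) (fun d => j / d) ?_ ?_ ?_ ?_ ?_
    · intro a ha
      simp only [Finset.mem_filter, Finset.mem_Icc] at ha ⊢
      obtain ⟨⟨ha1, ha2⟩, ⟨hmod, hsq⟩, hodd⟩ := ha
      have hdvd : a ∣ j := Int.dvd_of_emod_eq_zero hmod
      obtain ⟨q1, q2, q3, q4, q5⟩ := divfacts j a hj ha1 hdvd
      refine ⟨⟨⟨q1, q2⟩, hodd, Int.emod_eq_zero_of_dvd q3⟩, ?_⟩
      have hak : a ≤ j / a := by rw [Int.le_ediv_iff_mul_le (by omega : (0:Int) < a)]; omega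
      calc j = j / a * a := q5.symm
        _ ≤ j / a * (j / a) := by
              apply mul_le_mul_of_nonneg_left hak (by omega)
    · intro d hd
      simp only [Finset.mem_filter, Finset.mem_Icc] at hd ⊢
      obtain ⟨⟨⟨hd1, hd2⟩, hodd, hmod⟩, hbig⟩ := hd
      have hdvd : d ∣ j := Int.dvd_of_emod_eq_zero hmod
      obtain ⟨q1, q2, q3, q4, q5⟩ := divfacts j d hj hd1 hdvd
      refine ⟨⟨q1, q2⟩, ⟨Int.emod_eq_zero_of_dvd q3, ?_⟩, by rw [q4]; exact hodd⟩
      have hkd : j / d ≤ d := by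
        have : j / d * d ≤ d * d := by omega
        exact le_of_mul_le_mul_right this (by omega)
      calc j / d * (j / d) ≤ j / d * d := by
              apply mul_le_mul_of_nonneg_left hkd (by omega)
        _ = j := q5
    · intro a ha
      simp only [Finset.mem_filter, Finset.mem_Icc] at ha
      obtain ⟨⟨ha1, ha2⟩, ⟨hmod, hsq⟩, hodd⟩ := ha
      exact (divfacts j a hj ha1 (Int.dvd_of_emod_eq_zero hmod)).2.2.2.1
    · intro d hd
      simp only [Finset.mem_filter, Finset.mem_Icc] at hd
      obtain ⟨⟨⟨hd1, hd2⟩, hodd, hmod⟩, hbig⟩ := hd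
      exact (divfacts j d hj hd1 (Int.dvd_of_emod_eq_zero hmod)).2.2.2.1
    · intro a ha
      simp only [Finset.mem_filter, Finset.mem_Icc] at ha
      obtain ⟨⟨ha1, ha2⟩, ⟨hmod, hsq⟩, hodd⟩ := ha
      exact ((divfacts j a hj ha1 (Int.dvd_of_emod_eq_zero hmod)).2.2.2.1).symm
  · -- Σ_{small k, k ≠ j/k, k odd} j/k = Σ_{odd divisors d with d*d < j} j / d
    rw [← Finset.sum_filter, Finset.filter_filter]
    apply Finset.sum_congr
    · ext k
      simp only [Finset.mem_filter, Finset.mem_Icc, not_le]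
      constructor
      · rintro ⟨⟨hk1, hk2⟩, ⟨hmod, hsq⟩, hne, hodd⟩
        refine ⟨⟨⟨hk1, hk2⟩, hodd, hmod⟩, ?_⟩
        obtain ⟨-, -, -, -, q5⟩ := divfacts j k hj hk1 (Int.dvd_of_emod_eq_zero hmod)
        rcases lt_or_eq_of_le hsq with h | h
        · exact h
        · exfalso
          apply hne
          have : j / k * k = k * k := by omega
          have := mul_right_cancel₀ (by omega : k ≠ 0) this
          omega
      · rintro ⟨⟨⟨hk1, hk2⟩, hodd, hmod⟩, hsmall⟩
        refine ⟨⟨hk1, hk2⟩, ⟨hmod, by omega⟩, ?_, hodd⟩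
        obtain ⟨-, -, -, -, q5⟩ := divfacts j k hj hk1 (Int.dvd_of_emod_eq_zero hmod)
        intro heq
        rw [← heq] at q5
        omega
    · intro x _; rfl

lemma pv_len_foldl_set' (g : List Int → Int → Int) (L : List Int) (xs : List Int) :
    (L.foldl (fun s i => PySem.List.pySetD s i (g s i)) xs).length = xs.length := by
  induction L generalizing xs with
  | nil => rfl
  | cons a t ih =>
      simp only [List.foldl_cons]
      rw [ih, PySem.List.length_pySetD]

lemma pv_getD_replicate (n : Nat) (m : Int) (hm : 0 ≤ m) :
    PySem.List.pyGetD (List.replicate n (0:Int)) m 0 = 0 := by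
  rw [← Int.toNat_of_nonneg hm, PySem.List.pyGetD_natCast]
  rcases lt_or_ge m.toNat n with h | h
  · rw [List.getD_replicate _ h]
  · rw [List.getD_eq_default _ _ (by simpa using h)]

lemma sieve_inv (N : Int) (m : Int) (hm : 0 ≤ m) :
    ∀ (L : List Int) (xs : List Int), (∀ d ∈ L, 1 ≤ d) → xs.length = (N + 1).toNat →
    PySem.List.pyGetD
      (L.foldl (fun s d => (PySem.List.pyRange d (N + 1) d).foldl
        (fun s m' => PySem.List.pySetD s m' (PySem.List.pyGetD s m' 0 + PySem.Int.floordiv m' d)) s) xs) m 0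
    = PySem.List.pyGetD xs m 0
      + (L.map (fun d => if m ∈ PySem.List.pyRange d (N + 1) d then PySem.Int.floordiv m d else 0)).sum := by
  intro L
  induction L with
  | nil => intro xs _ _; simp
  | cons a t ih =>
      intro xs hL hlen
      simp only [List.foldl_cons, List.map_cons, List.sum_cons]
      have ha : 1 ≤ a := hL a (by simp)
      have hb : ∀ i ∈ PySem.List.pyRange a (N + 1) a, 0 ≤ i ∧ i.toNat < xs.length := by
        intro i hi
        rw [PySem.List.mem_pyRange_iff_of_pos (by omega)] at hi
        constructor
        · omega
        · rw [hlen]; omega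
      have hlen' := pv_len_foldl_set'
        (fun s i => PySem.List.pyGetD s i 0 + PySem.Int.floordiv i a)
        (PySem.List.pyRange a (N + 1) a) xs
      rw [ih _ (fun d hd => hL d (by simp [hd])) (by rw [hlen']; exact hlen)]
      rw [pv_scatter_add (fun i => PySem.Int.floordiv i a) _ xs
            (pv_nodup_pyRange_pos _ _ _ (by omega)) hb m hm]
      rw [add_assoc]

lemma key_B (N j : Int) (_hN : 0 ≤ N) (hj1 : 1 ≤ j) (hjN : j ≤ N) :
    PySem.List.pyGetD (bSieve N) j 0 = oddDivCofactorSum j := by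
  unfold bSieve
  rw [sieve_inv N j (by omega) _ _
        (fun d hd => by
          rw [PySem.List.mem_pyRange_iff_of_pos (by omega)] at hd
          omega)
        (by simp)]
  rw [pv_getD_replicate _ _ (by omega), zero_add]
  have hnd := pv_nodup_pyRange_pos 1 (N + 1) 2 (by omega)
  rw [← List.sum_toFinset _ hnd, ← Finset.sum_filter]
  unfold oddDivCofactorSum
  apply Finset.sum_congr
  · ext d
    simp only [Finset.mem_filter, List.mem_toFinset, Finset.mem_Icc]
    constructor
    · rintro ⟨hdmem, hjmem⟩
      rw [PySem.List.mem_pyRange_iff_of_pos (by omega : (0:Int) < 2)] at hdmem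
      obtain ⟨hd1, hd2, hd3⟩ := hdmem
      rw [PySem.List.mem_pyRange_iff_of_pos (by omega : (0:Int) < d)] at hjmem
      obtain ⟨hj2, hj3, hj4⟩ := hjmem
      have hdvd : d ∣ j := (dvd_sub_left (dvd_refl d)).mp hj4
      exact ⟨⟨by omega, by omega⟩, by omega, Int.emod_eq_zero_of_dvd hdvd⟩
    · rintro ⟨⟨hd1, hd2⟩, hodd, hmod⟩
      have hdvd : d ∣ j := Int.dvd_of_emod_eq_zero hmod
      constructor
      · rw [PySem.List.mem_pyRange_iff_of_pos (by omega : (0:Int) < 2)]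
        omega
      · rw [PySem.List.mem_pyRange_iff_of_pos (by omega : (0:Int) < d)]
        exact ⟨by omega, by omega, (dvd_sub_left (dvd_refl d)).mpr hdvd⟩
  · intro d hd
    simp only [Finset.mem_filter, Finset.mem_Icc] at hd
    rw [PySem.Int.floordiv_eq_ediv_of_pos (by omega : (0:Int) < d)]

lemma key_A (N j : Int) (hN : 0 ≤ N) (hj1 : 1 ≤ j) (hjN : j ≤ N) :
    PySem.List.pyGetD (aDivisorArray N) j 0 = 2 * oddDivCofactorSum j := by
  unfold aDivisorArray
  rw [pv_scatter_set (fun i => 2 * aWhile i 1 0) _ _ (PySem.List.nodup_pyRange_one 1 (N + 1))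
        (fun i hi => by
          rw [PySem.List.mem_pyRange_one] at hi
          refine ⟨by omega, ?_⟩
          simp only [List.length_replicate]
          omega)
        j (by omega)]
  rw [if_pos (by rw [PySem.List.mem_pyRange_one]; omega)]
  rw [aWhile_sum j 1 0 le_rfl, zero_add, pairing j hj1]
  rfl

-- ===== VERDICT (by name: the statement is the Claim_ definition above) =====
theorem compute_overpartitions_spec : Claim_equal_compute_overpartitions := by
  intro N _ hN
  unfold Spec_compute_overpartitions compute_overpartitions compute_overpartitions_alt
  simp only []
  apply PySem.List.foldl_congr_mem
  intro pbar n hn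
  rw [PySem.List.mem_pyRange_one] at hn
  congr 1
  congr 1
  apply PySem.List.foldl_congr_mem
  intro acc j hj
  rw [PySem.List.mem_pyRange_one] at hj
  rw [key_A N j hN hj.1 (by omega), key_B N j hN hj.1 (by omega), mul_assoc]
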